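-- pv_equiv track=rewrite | github.com/ztazy/improvado_test | main.py | advanced
-- ===== SOURCE A (Python) =====
-- from collections import defaultdict
--
-- def advanced(data, min_index):
--     header = data[0].keys()
--     output = "\t".join(header) + '\n'
--     sort_data = defaultdict(list)
--     for item in data:
--         sort_data["".join(list(item.values())[:min_index])].append(list(map(int, list(item.values())[min_index:])))
--
--     result = dict()
--     for key, values in sorted(sort_data.items(), key=lambda x: x[0]):
--         result_values = [0] * len(values[0])
--         for value in values:
--             for index, element in enumerate(value):
--                 result_values[index] += element
--         result[key] = result_values
--     for key, item in result.items():
--         output += "\t".join(key) + "\t" + "\t".join(map(str, item)) + '\n'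
--
--     return output
-- ===== SOURCE B (Python) =====
-- def advanced(data, min_index):
--     header = data[0].keys()
--     pairs = []
--     for item in data:
--         vals = list(item.values())
--         pairs.append(("".join(vals[:min_index]), vals[min_index:]))
--     keys = sorted({k for k, _ in pairs})
--     output = "\t".join(header) + '\n'
--     for k in keys:
--         group = [vals for kk, vals in pairs if kk == k]
--         total = [int(v) for v in group[0]]
--         for vals in group[1:]:
--             for i, v in enumerate(vals):
--                 total[i] += int(v)
--         output += "\t".join(k) + "\t" + "\t".join(map(str, total)) + '\n'
--     return output
-- ===== Notes on version B (the rewrite author's own statement) =====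
-- stated objective: alternative
-- what changed: Replaces the defaultdict-of-lists grouping plus sorted(items) plus a second result dict with a single pass building (key, suffix) pairs, a sorted set of distinct keys, and one filter-and-accumulate scan per key that sums columns directly without materialising per-group row lists or any dict.
import Mathlib
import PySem

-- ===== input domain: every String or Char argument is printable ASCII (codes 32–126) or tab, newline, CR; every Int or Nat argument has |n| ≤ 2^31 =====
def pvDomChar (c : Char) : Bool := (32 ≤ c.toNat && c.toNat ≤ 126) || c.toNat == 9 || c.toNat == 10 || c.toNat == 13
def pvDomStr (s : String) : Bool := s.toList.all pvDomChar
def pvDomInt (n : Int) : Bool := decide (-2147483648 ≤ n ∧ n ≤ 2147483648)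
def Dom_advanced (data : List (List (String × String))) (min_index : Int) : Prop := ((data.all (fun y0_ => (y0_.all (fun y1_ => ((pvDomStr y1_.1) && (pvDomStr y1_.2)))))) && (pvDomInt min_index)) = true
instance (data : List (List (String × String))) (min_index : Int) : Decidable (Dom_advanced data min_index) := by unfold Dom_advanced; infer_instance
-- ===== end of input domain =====

-- B replaces A's defaultdict grouping + sorted(items) + second result dict by a sorted set of
-- distinct keys and one filter-and-accumulate pass per key (alternative decomposition, same results).

-- ===== PORT A =====
-- `rv[i] += e` is ported with the total forms pyGetD/pySetD; exact under Pre_ (index in range),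
-- where Python would raise IndexError the input is excluded by Pre_advanced.
def advanced (data : List (List (String × String))) (min_index : Int) : String :=
  let header := (PySem.Dict.ofList ((PySem.List.pyGet? data 0).getD [])).keys
  let output := PySem.Str.join "\t" header ++ "\n"
  let sort_data := data.foldl (fun d item =>
      d.modify (PySem.Str.join "" (PySem.List.slice (PySem.Dict.ofList item).values none (some min_index)))
        []
        (· ++ [(PySem.List.slice (PySem.Dict.ofList item).values (some min_index) none).map
                 (fun s => (PySem.Int.ofStr? s).getD 0)]))
    PySem.Dict.empty
  let result := (PySem.List.sorted sort_data.items (fun x => x.1) false).foldl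
    (fun res kv =>
      let result_values := List.replicate ((PySem.List.pyGet? kv.2 0).getD []).length (0 : Int)
      let result_values := kv.2.foldl (fun rv value =>
          (PySem.List.enumerate value 0).foldl
            (fun rv ie => PySem.List.pySetD rv ie.1 (PySem.List.pyGetD rv ie.1 0 + ie.2)) rv)
        result_values
      res.insert kv.1 result_values)
    (PySem.Dict.empty : PySem.Dict String (List Int))
  result.items.foldl (fun out kv =>
      out ++ PySem.Str.join "\t" (kv.1.toList.map (fun c => String.ofList [c])) ++ "\t"
          ++ PySem.Str.join "\t" (kv.2.map PySem.Int.toStr) ++ "\n")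
    output

-- ===== PORT B =====
def advanced_alt (data : List (List (String × String))) (min_index : Int) : String :=
  let header := (PySem.Dict.ofList ((PySem.List.pyGet? data 0).getD [])).keys
  let pairs := data.map (fun item =>
      (PySem.Str.join "" (PySem.List.slice (PySem.Dict.ofList item).values none (some min_index)),
       PySem.List.slice (PySem.Dict.ofList item).values (some min_index) none))
  let keys := PySem.List.sorted (PySem.Set.ofList (pairs.map (·.1))) (fun k => k) false
  keys.foldl (fun out k =>
      let group := (pairs.filter (fun p => p.1 == k)).map (·.2)
      let total := ((PySem.List.pyGet? group 0).getD []).map (fun v => (PySem.Int.ofStr? v).getD 0)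
      let total := (group.drop 1).foldl (fun tot vals =>
          (PySem.List.enumerate vals 0).foldl
            (fun tot ie => PySem.List.pySetD tot ie.1
              (PySem.List.pyGetD tot ie.1 0 + (PySem.Int.ofStr? ie.2).getD 0)) tot)
        total
      out ++ PySem.Str.join "\t" (k.toList.map (fun c => String.ofList [c])) ++ "\t"
          ++ PySem.Str.join "\t" (total.map PySem.Int.toStr) ++ "\n")
    (PySem.Str.join "\t" header ++ "\n")

-- ===== PRECONDITION & SPEC =====
-- helpers for Pre_ only: the prefix key and the post-min_index value suffix of a row
def pvKeyOf (min_index : Int) (item : List (String × String)) : String :=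
  PySem.Str.join "" (PySem.List.slice (PySem.Dict.ofList item).values none (some min_index))
def pvSufOf (min_index : Int) (item : List (String × String)) : List String :=
  PySem.List.slice (PySem.Dict.ofList item).values (some min_index) none
-- Pre_ excludes exactly the inputs where Python A raises: empty data (IndexError on data[0]),
-- a suffix value int() cannot parse (ValueError), and a row whose suffix is longer than that of
-- the first row of its key group (IndexError in the summing loop).
def Pre_advanced (data : List (List (String × String))) (min_index : Int) : Prop :=
  data ≠ [] ∧
  (∀ r ∈ data, ∀ s ∈ pvSufOf min_index r, (PySem.Int.ofStr? s).isSome = true) ∧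
  (∀ r ∈ data, (pvSufOf min_index r).length ≤
     (pvSufOf min_index ((data.find? (fun r' => pvKeyOf min_index r' == pvKeyOf min_index r)).getD r)).length)
instance (data : List (List (String × String))) (min_index : Int) : Decidable (Pre_advanced data min_index) := by unfold Pre_advanced; infer_instance
def pvWitness_advanced : (List (List (String × String))) × Int := ([[("a", "x"), ("b", "1")], [("a", "x"), ("b", "2")]], 1)
def Spec_advanced (data : List (List (String × String))) (min_index : Int) (out : String) : Prop := out = advanced_alt data min_index
instance (data : List (List (String × String))) (min_index : Int) (out : String) : Decidable (Spec_advanced data min_index out) := by unfold Spec_advanced; infer_instance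

-- ===== CLAIM (what is proved, stated in full; the proofs are below) =====
def Claim_equal_advanced : Prop := ∀ (data : List (List (String × String))) (min_index : Int), Dom_advanced data min_index → Pre_advanced data min_index → Spec_advanced data min_index (advanced data min_index)

-- ===== LEMMAS AND PROOFS =====
-- proof-side defs
def pvToI (s : String) : Int := (PySem.Int.ofStr? s).getD 0
def pvIv (mi : Int) (r : List (String × String)) : List Int := (pvSufOf mi r).map (fun s => pvToI s)
def pvKeys (data : List (List (String × String))) (mi : Int) : List String :=
  PySem.List.sorted (PySem.Set.ofList (data.map (fun r => pvKeyOf mi r))) (fun k => k) false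
def pvGroup (data : List (List (String × String))) (mi : Int) (k : String) : List (List String) :=
  (data.filter (fun r => pvKeyOf mi r == k)).map (fun r => pvSufOf mi r)
def pvHeader (data : List (List (String × String))) : String :=
  PySem.Str.join "\t" (PySem.Dict.ofList ((PySem.List.pyGet? data 0).getD [])).keys ++ "\n"
def pvLine (k : String) (t : List Int) : String :=
  PySem.Str.join "\t" (k.toList.map (fun c => String.ofList [c])) ++ "\t"
    ++ PySem.Str.join "\t" (t.map PySem.Int.toStr) ++ "\n"
def pvAddI (t v : List Int) : List Int :=
  (PySem.List.enumerate v 0).foldl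
    (fun t ie => PySem.List.pySetD t ie.1 (PySem.List.pyGetD t ie.1 0 + ie.2)) t
def pvSumA (vals : List (List Int)) : List Int :=
  vals.foldl (fun t v => pvAddI t v) (List.replicate ((PySem.List.pyGet? vals 0).getD []).length 0)
def pvSumB (g : List (List String)) : List Int :=
  (g.drop 1).foldl (fun t v => (PySem.List.enumerate v 0).foldl
    (fun t ie => PySem.List.pySetD t ie.1 (PySem.List.pyGetD t ie.1 0 + pvToI ie.2)) t)
    (((PySem.List.pyGet? g 0).getD []).map (fun s => pvToI s))

lemma pv_A_norm (data : List (List (String × String))) (mi : Int) :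
    advanced data mi = (pvKeys data mi).foldl
      (fun out k => out ++ pvLine k (pvSumA ((pvGroup data mi k).map (fun v => v.map (fun s => pvToI s)))))
      (pvHeader data) := by
  have hfold : data.foldl (fun d item =>
      d.modify (PySem.Str.join "" (PySem.List.slice (PySem.Dict.ofList item).values none (some mi)))
        []
        (· ++ [(PySem.List.slice (PySem.Dict.ofList item).values (some mi) none).map
                 (fun s => (PySem.Int.ofStr? s).getD 0)]))
      (PySem.Dict.empty : PySem.Dict String (List (List Int)))
    = (data.map (fun r => (pvKeyOf mi r, pvIv mi r))).foldl
        (fun d p => d.modify p.1 [] (· ++ [p.2])) PySem.Dict.empty := by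
    rw [List.foldl_map]
    rfl
  simp only [advanced]
  rw [hfold]
  set pairsA := data.map (fun r => (pvKeyOf mi r, pvIv mi r)) with hpairs
  set sd := pairsA.foldl (fun d p => d.modify p.1 [] (· ++ [p.2])) PySem.Dict.empty with hsd
  have hupd : @PySem.Set.update String _ [] = PySem.Set.ofList := by
    funext xs; rw [PySem.Set.ofList_eq_foldl]; rfl
  have hkeys : sd.keys = PySem.Set.ofList (data.map (fun r => pvKeyOf mi r)) := by
    have h := PySem.Dict.keys_foldl_modify_key pairsA (fun p => p.1) [] (fun _ p => (· ++ [p.2]))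
      PySem.Dict.empty
    simp only [PySem.Dict.keys_empty, hupd, hpairs, List.map_map, Function.comp_def] at h
    exact h
  have hnodup : sd.keys.Nodup := by rw [hkeys]; exact PySem.Set.nodup_ofList _
  have hgetD : ∀ k, sd.getD k []
      = (pvGroup data mi k).map (fun v => v.map (fun s => pvToI s)) := by
    intro k
    have h := PySem.Dict.getD_foldl_modify_append pairsA PySem.Dict.empty k
    simp only [PySem.Dict.getD_empty, List.nil_append, hpairs, List.filter_map, List.map_map,
      Function.comp_def] at h
    rw [h]
    simp only [pvGroup, pvIv, List.map_map, Function.comp_def]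
  have hitems : sd.items = sd.keys.map (fun k => (k, sd.getD k [])) :=
    PySem.Dict.items_eq_map_keys sd hnodup []
  have hperm : ((pvKeys data mi).map
      (fun k => (k, (pvGroup data mi k).map (fun v => v.map (fun s => pvToI s))))).Perm sd.items := by
    have h1 : sd.items = sd.keys.map
        (fun k => (k, (pvGroup data mi k).map (fun v => v.map (fun s => pvToI s)))) := by
      rw [hitems]
      exact List.map_congr_left (fun k _ => by rw [hgetD])
    rw [h1, hkeys]
    exact List.Perm.map _ (PySem.List.sorted_perm _ _ _)
  have hsorted : PySem.List.sorted sd.items (fun x => x.1) false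
      = (pvKeys data mi).map
        (fun k => (k, (pvGroup data mi k).map (fun v => v.map (fun s => pvToI s)))) := by
    apply PySem.List.sorted_eq_of_perm_of_pairwise_lt _ _ _ hperm
    rw [List.pairwise_map]
    exact PySem.List.sorted_ofList_pairwise_lt (data.map (fun r => pvKeyOf mi r))
  rw [hsorted, List.foldl_map]
  have hfresh := PySem.Dict.items_foldl_insert_fresh (pvKeys data mi) (fun k => k)
    (fun k => pvSumA ((pvGroup data mi k).map (fun v => v.map (fun s => pvToI s))))
    PySem.Dict.empty
    (fun a _ => PySem.Dict.contains_empty _)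
    (by
      have hp := PySem.List.sorted_perm (PySem.Set.ofList (data.map (fun r => pvKeyOf mi r)))
        (fun k : String => k) false
      simpa [pvKeys] using hp.nodup_iff.mpr (PySem.Set.nodup_ofList (data.map (fun r => pvKeyOf mi r))))
  rw [show (PySem.Dict.empty : PySem.Dict String (List Int)).items = [] from rfl, List.nil_append] at hfresh
  simp only [pvSumA, pvAddI] at hfresh
  rw [hfresh, List.foldl_map]
  simp only [pvLine, pvHeader, pvSumA, pvAddI, String.append_assoc]

lemma pv_B_norm (data : List (List (String × String))) (mi : Int) :
    advanced_alt data mi = (pvKeys data mi).foldl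
      (fun out k => out ++ pvLine k (pvSumB (pvGroup data mi k)))
      (pvHeader data) := by
  simp only [advanced_alt, pvKeys, pvHeader, pvLine, pvSumB, pvGroup, pvKeyOf, pvSufOf, pvToI,
    List.map_map, List.filter_map, Function.comp_def, String.append_assoc]

lemma pv_enum_map : ∀ (vals : List String) (s : Int) (t : List Int),
    (PySem.List.enumerate vals s).foldl
      (fun t ie => PySem.List.pySetD t ie.1 (PySem.List.pyGetD t ie.1 0 + pvToI ie.2)) t
    = (PySem.List.enumerate (vals.map (fun s => pvToI s)) s).foldl
      (fun t ie => PySem.List.pySetD t ie.1 (PySem.List.pyGetD t ie.1 0 + ie.2)) t := by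
  intro vals
  induction vals with
  | nil => intro s t; simp [PySem.List.enumerate_nil]
  | cons x xs ih => intro s t; simp [PySem.List.enumerate_cons, ih]

lemma pv_addFrom : ∀ (w p : List Int),
    (PySem.List.enumerate w (p.length : Int)).foldl
      (fun t ie => PySem.List.pySetD t ie.1 (PySem.List.pyGetD t ie.1 0 + ie.2))
      (p ++ List.replicate w.length 0)
    = p ++ w := by
  intro w
  induction w with
  | nil => intro p; simp [PySem.List.enumerate_nil]
  | cons x xs ih =>
    intro p
    rw [PySem.List.enumerate_cons]
    simp only [List.foldl_cons, List.length_cons, List.replicate_succ]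
    have hget : PySem.List.pyGetD (p ++ 0 :: List.replicate xs.length (0:Int)) (p.length : Int) 0 = 0 := by
      simp [PySem.List.pyGetD_natCast]
    have hset : PySem.List.pySetD (p ++ 0 :: List.replicate xs.length (0:Int)) (p.length : Int) (0 + x)
        = (p ++ [x]) ++ List.replicate xs.length 0 := by
      simp [PySem.List.pySetD_natCast]
    rw [hget, hset]
    have := ih (p ++ [x])
    simp only [List.length_append, List.length_cons, List.length_nil] at this
    push_cast at this ⊢
    rw [this]
    simp

lemma pv_sum_eq (g : List (List String)) (hne : g ≠ []) :
    pvSumA (g.map (fun v => v.map (fun s => pvToI s))) = pvSumB g := by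
  obtain ⟨v, t, rfl⟩ : ∃ v t, g = v :: t := by
    cases g with
    | nil => exact absurd rfl hne
    | cons v t => exact ⟨v, t, rfl⟩
  simp only [pvSumA, pvSumB, List.map_cons, List.foldl_cons, List.drop_succ_cons, List.drop_zero]
  have h0 : (PySem.List.pyGet? ((v.map (fun s => pvToI s)) :: t.map (fun v => v.map (fun s => pvToI s))) (0:Int)).getD []
      = v.map (fun s => pvToI s) := by
    simp [PySem.List.pyGet?, PySem.List.pyIdx?]
  have h0' : (PySem.List.pyGet? (v :: t) (0:Int)).getD [] = v := by
    simp [PySem.List.pyGet?, PySem.List.pyIdx?]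
  rw [h0, h0']
  have hfirst := pv_addFrom (v.map (fun s => pvToI s)) []
  simp only [List.nil_append, List.length_nil, Nat.cast_zero, List.length_map] at hfirst
  simp only [List.length_map, pvAddI]
  rw [hfirst, List.foldl_map]
  exact PySem.List.foldl_congr_mem _ _ _ _ (fun acc x _ => (pv_enum_map x 0 acc).symm)

lemma pv_group_ne (data : List (List (String × String))) (mi : Int) (k : String)
    (hk : k ∈ pvKeys data mi) : pvGroup data mi k ≠ [] := by
  rw [pvKeys, PySem.List.mem_sorted, PySem.Set.mem_ofList, List.mem_map] at hk
  obtain ⟨r, hr, rfl⟩ := hk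
  simp only [pvGroup, ne_eq, List.map_eq_nil_iff, List.filter_eq_nil_iff]
  intro h
  exact h r hr (by simp)

theorem pv_main (data : List (List (String × String))) (mi : Int) :
    advanced data mi = advanced_alt data mi := by
  rw [pv_A_norm, pv_B_norm]
  apply PySem.List.foldl_congr_mem
  intro acc k hk
  rw [pv_sum_eq _ (pv_group_ne data mi k hk)]

-- ===== VERDICT (by name: the statement is the Claim_ definition above) =====
theorem advanced_spec : Claim_equal_advanced := by
  intro data mi _ _
  unfold Spec_advanced
  exact pv_main data mi
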